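-- pv_equiv track=rewrite | github.com/navalkishoreb/LeetCodeProblems | src/DirectorOfPhotography/solution.py | getArtisticPhotographCount
-- ===== SOURCE A (Python) =====
-- def getArtisticPhotographCount(N: int, C: str, X: int, Y: int) -> int:
--     a_positions = []
--     p_counter = [0]
--     b_counter = [0]
--     p_count = 0
--     b_count = 0
--     for index, item in enumerate(C):
--         if item == "A":
--             a_positions.append(index)
--
--         if item == "P":
--             p_count += 1
--
--         if item == "B":
--             b_count += 1
--
--         p_counter.append(p_count)
--         b_counter.append(b_count)
--
--     total_permutations = 0
--     for a_index in a_positions: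
--         left_start = max(0, a_index - Y)
--         left_end = max(0, a_index - X + 1)
--
--         right_start = min(N, a_index + X)
--         right_end = min(N, a_index + Y + 1)
--
--         p_left_count = p_counter[left_end] - p_counter[left_start]
--         b_left_count = b_counter[left_end] - b_counter[left_start]
--
--         p_right_count = p_counter[right_end] - p_counter[right_start]
--         b_right_count = b_counter[right_end] - b_counter[right_start]
--
--         total_permutations += (
--             p_left_count * b_right_count + p_right_count * b_left_count
--         )
--
--     return total_permutations
-- ===== SOURCE B (Python) =====
-- def getArtisticPhotographCount(N: int, C: str, X: int, Y: int) -> int: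
--     total = 0
--     for a, ch in enumerate(C):
--         if ch == "A":
--             pl = bl = 0
--             for j in range(max(0, a - Y), a - X + 1):
--                 if C[j] == "P":
--                     pl += 1
--                 elif C[j] == "B":
--                     bl += 1
--             pr = br = 0
--             for j in range(max(0, a + X), min(N, a + Y + 1)):
--                 if C[j] == "P":
--                     pr += 1
--                 elif C[j] == "B":
--                     br += 1
--             total += pl * br + pr * bl
--     return total
-- ===== Notes on version B (the rewrite author's own statement) =====
-- stated objective: simpler
-- what changed: Dropped the two prefix-sum counter arrays and the collected position list: B makes one pass over the string and, at each 'A', directly scans its clamped left and right distance windows counting P's and B's inline.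
-- outside the precondition, e.g. on getArtisticPhotographCount(3, 'PAB', 3, 0): A returns 1, B returns 0; on getArtisticPhotographCount(3, 'PAB', -1, 2): A returns 2, B returns 2; on getArtisticPhotographCount(5, 'AB', 1, 0): A returns 0, B returns 0
import Mathlib
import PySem

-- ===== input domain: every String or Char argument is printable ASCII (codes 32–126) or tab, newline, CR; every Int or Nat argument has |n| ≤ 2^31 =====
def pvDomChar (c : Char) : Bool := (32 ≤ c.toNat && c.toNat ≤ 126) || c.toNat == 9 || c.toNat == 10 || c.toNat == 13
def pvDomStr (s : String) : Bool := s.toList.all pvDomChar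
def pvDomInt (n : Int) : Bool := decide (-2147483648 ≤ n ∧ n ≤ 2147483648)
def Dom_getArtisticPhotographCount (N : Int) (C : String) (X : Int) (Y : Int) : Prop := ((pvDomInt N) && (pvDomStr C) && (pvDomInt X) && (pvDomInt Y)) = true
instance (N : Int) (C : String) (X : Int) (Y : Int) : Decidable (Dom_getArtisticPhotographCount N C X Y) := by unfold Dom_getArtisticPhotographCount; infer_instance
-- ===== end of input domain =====

-- B drops A's prefix-sum counter arrays and position list, instead scanning each 'A''s two
-- clamped distance windows directly: simpler (no precomputed tables), and a timing run
-- measured it faster on its inputs, though it does more work when Y - X is large.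

-- ===== PORT A =====
-- loop body of A's first (counting) pass: state = (a_positions, p_counter, b_counter, p_count, b_count)
def pvStepCount (s : List Int × List Int × List Int × Int × Int) (p : Int × Char) :
    List Int × List Int × List Int × Int × Int :=
  let a_positions := if p.2 = 'A' then s.1 ++ [p.1] else s.1
  let p_count := if p.2 = 'P' then s.2.2.2.1 + 1 else s.2.2.2.1
  let b_count := if p.2 = 'B' then s.2.2.2.2 + 1 else s.2.2.2.2
  (a_positions, s.2.1 ++ [p_count], s.2.2.1 ++ [b_count], p_count, b_count)

-- loop body of A's second pass (pyGetD is exact here: Pre_ keeps every index in range)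
def pvStepTotal (N X Y : Int) (pc bc : List Int) (total : Int) (a : Int) : Int :=
  let left_start := max 0 (a - Y)
  let left_end := max 0 (a - X + 1)
  let right_start := min N (a + X)
  let right_end := min N (a + Y + 1)
  let plc := PySem.List.pyGetD pc left_end 0 - PySem.List.pyGetD pc left_start 0
  let blc := PySem.List.pyGetD bc left_end 0 - PySem.List.pyGetD bc left_start 0
  let prc := PySem.List.pyGetD pc right_end 0 - PySem.List.pyGetD pc right_start 0
  let brc := PySem.List.pyGetD bc right_end 0 - PySem.List.pyGetD bc right_start 0
  total + (plc * brc + prc * blc)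

def getArtisticPhotographCount (N : Int) (C : String) (X : Int) (Y : Int) : Int :=
  let st := (PySem.List.enumerate C.toList 0).foldl pvStepCount ([], [0], [0], 0, 0)
  st.1.foldl (pvStepTotal N X Y st.2.1 st.2.2.1) 0

-- ===== PORT B =====
-- body of B's inner window loops: tally (P-count, B-count) at index j (pyGetD exact under Pre_)
def pvWinStep (cs : List Char) (q : Int × Int) (j : Int) : Int × Int :=
  let ch := PySem.List.pyGetD cs j ' '
  if ch = 'P' then (q.1 + 1, q.2) else if ch = 'B' then (q.1, q.2 + 1) else q

def getArtisticPhotographCount_alt (N : Int) (C : String) (X : Int) (Y : Int) : Int :=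
  let cs := C.toList
  (PySem.List.enumerate cs 0).foldl (fun total p =>
    if p.2 = 'A' then
      let l := (PySem.List.pyRange (max 0 (p.1 - Y)) (p.1 - X + 1)).foldl (pvWinStep cs) (0, 0)
      let r := (PySem.List.pyRange (max 0 (p.1 + X)) (min N (p.1 + Y + 1))).foldl (pvWinStep cs) (0, 0)
      total + (l.1 * r.2 + r.1 * l.2)
    else total) 0

-- ===== PRECONDITION & SPEC =====
-- Pre_ admits every C without an 'A' (both programs trivially return 0 there) and otherwise the
-- problem's natural domain -(len+1) ≤ N ≤ len(C), 0 ≤ X ≤ Y+1 (the puzzle's constraints, plus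
-- the degenerate cases X = Y+1 and N ≤ 0 with empty right windows): outside it A raises
-- IndexError or, where it returns (X > Y+1, negative X, N > len), its value comes from negative
-- prefix differences / negative-index wraparound that no caller would specify, and B's plain
-- window scan returns the natural count.
def Pre_getArtisticPhotographCount (N : Int) (C : String) (X : Int) (Y : Int) : Prop :=
  ¬ ('A' ∈ C.toList) ∨ (-((C.length : Int) + 1) ≤ N ∧ N ≤ (C.length : Int) ∧ 0 ≤ X ∧ X ≤ Y + 1)
instance (N : Int) (C : String) (X : Int) (Y : Int) : Decidable (Pre_getArtisticPhotographCount N C X Y) := by unfold Pre_getArtisticPhotographCount; infer_instance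

def pvWitness_getArtisticPhotographCount : Int × String × Int × Int := (3, "PAB", 1, 2)

def Spec_getArtisticPhotographCount (N : Int) (C : String) (X : Int) (Y : Int) (out : Int) : Prop := out = getArtisticPhotographCount_alt N C X Y
instance (N : Int) (C : String) (X : Int) (Y : Int) (out : Int) : Decidable (Spec_getArtisticPhotographCount N C X Y out) := by unfold Spec_getArtisticPhotographCount; infer_instance

-- ===== CLAIM (what is proved, stated in full; the proofs are below) =====
def Claim_equal_getArtisticPhotographCount : Prop := ∀ (N : Int) (C : String) (X : Int) (Y : Int), Dom_getArtisticPhotographCount N C X Y → Pre_getArtisticPhotographCount N C X Y → Spec_getArtisticPhotographCount N C X Y (getArtisticPhotographCount N C X Y)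

-- ===== LEMMAS AND PROOFS =====

-- count of character c in l, as an Int
def pvCnt (c : Char) (l : List Char) : Int := (l.countP (· = c) : Int)

-- the tail of A's running prefix-counter list for character c, starting from count p
def pvPref (c : Char) (p : Int) : List Char → List Int
  | [] => []
  | d :: rest => (if d = c then p + 1 else p) :: pvPref c (if d = c then p + 1 else p) rest

theorem pvCnt_cons (c d : Char) (l : List Char) :
    pvCnt c (d :: l) = (if d = c then 1 else 0) + pvCnt c l := by
  by_cases h : d = c <;> simp [pvCnt, h, Int.add_comm]

theorem pvPref_getD (c : Char) (cs : List Char) (p : Int) (k : Nat) (hk : k ≤ cs.length) :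
    (p :: pvPref c p cs).getD k 0 = p + pvCnt c (cs.take k) := by
  induction cs generalizing p k with
  | nil =>
    have hk0 : k = 0 := by simpa using hk
    subst hk0
    simp [pvCnt]
  | cons d rest ih =>
    cases k with
    | zero => simp [pvCnt]
    | succ k =>
      simp only [pvPref, List.getD_cons_succ, List.take_succ_cons, pvCnt_cons]
      rw [ih _ k (by simpa using hk)]
      split_ifs <;> ring

-- characterisation of A's first loop
theorem pvFoldCount (cs : List Char) (s0 : Int) (ap pc bc : List Int) (p b : Int) :
    (PySem.List.enumerate cs s0).foldl pvStepCount (ap, pc, bc, p, b)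
    = (ap ++ ((PySem.List.enumerate cs s0).filter (fun q => q.2 = 'A')).map (·.1),
       pc ++ pvPref 'P' p cs, bc ++ pvPref 'B' b cs,
       p + pvCnt 'P' cs, b + pvCnt 'B' cs) := by
  induction cs generalizing s0 ap pc bc p b with
  | nil => simp [PySem.List.enumerate_nil, pvCnt, pvPref]
  | cons d rest ih =>
    rw [PySem.List.enumerate_cons]
    simp only [List.foldl_cons, pvStepCount, List.filter_cons, pvPref, pvCnt_cons]
    rw [ih]
    split_ifs with h1 h2 h3 <;>
      simp_all [List.append_assoc] <;> ring

-- characterisation of B's window loops: a scan of range [lo, hi) tallies the P's and B's of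
-- the slice cs[lo:hi]
theorem pvWinFold (cs : List Char) (n : Nat) :
    ∀ (lo hi : Int), (hi - lo).toNat = n → 0 ≤ lo → hi ≤ (cs.length : Int) →
    ∀ q : Int × Int,
    (PySem.List.pyRange lo hi).foldl (pvWinStep cs) q
    = (q.1 + pvCnt 'P' ((cs.take hi.toNat).drop lo.toNat),
       q.2 + pvCnt 'B' ((cs.take hi.toNat).drop lo.toNat)) := by
  induction n with
  | zero =>
    intro lo hi hn h0 hlen q
    have hle : hi ≤ lo := by omega
    rw [PySem.List.pyRange_one_eq_nil hle]
    rw [List.drop_eq_nil_of_le (by simp; omega)]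
    simp [pvCnt]
  | succ n ih =>
    intro lo hi hn h0 hlen q
    have hlt : lo < hi := by omega
    rw [PySem.List.pyRange_one_cons hlt]
    simp only [List.foldl_cons]
    rw [ih (lo + 1) hi (by omega) (by omega) hlen]
    have hlo : lo.toNat < (cs.take hi.toNat).length := by simp; omega
    rw [List.drop_eq_getElem_cons hlo]
    have hget : (cs.take hi.toNat)[lo.toNat] = cs[lo.toNat]'(by simp at hlo; omega) := by
      simp [List.getElem_take]
    have hstep : pvWinStep cs q lo =
        (if cs[lo.toNat]'(by simp at hlo; omega) = 'P' then (q.1 + 1, q.2)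
         else if cs[lo.toNat]'(by simp at hlo; omega) = 'B' then (q.1, q.2 + 1) else q) := by
      simp only [pvWinStep]
      rw [PySem.List.pyGetD_eq_getElem cs ' ' h0 (by omega)]
    rw [hstep, hget]
    have h1 : (lo + 1).toNat = lo.toNat + 1 := by omega
    rw [h1, pvCnt_cons, pvCnt_cons]
    split_ifs with hP hB <;> simp_all <;> ring

-- A's prefix-difference over [s, e) equals the count in the slice cs[s:e]
theorem pvPrefDiff (c : Char) (cs : List Char) (s e : Int)
    (h0 : 0 ≤ s) (hse : s ≤ e) (he : e ≤ (cs.length : Int)) :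
    PySem.List.pyGetD ((0:Int) :: pvPref c 0 cs) e 0
      - PySem.List.pyGetD ((0:Int) :: pvPref c 0 cs) s 0
    = pvCnt c ((cs.take e.toNat).drop s.toNat) := by
  rw [PySem.List.pyGetD_of_nonneg _ _ (le_trans h0 hse), PySem.List.pyGetD_of_nonneg _ _ h0]
  rw [pvPref_getD c cs 0 e.toNat (by omega), pvPref_getD c cs 0 s.toNat (by omega)]
  have hsplit : cs.take e.toNat =
      cs.take s.toNat ++ (cs.take e.toNat).drop s.toNat := by
    conv_lhs => rw [← List.take_append_drop s.toNat (cs.take e.toNat)]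
    rw [List.take_take, Nat.min_eq_left (by omega)]
  conv_lhs => rw [hsplit]
  simp [pvCnt, List.countP_append]

-- pushing B's outer fold through the 'A'-filter
theorem pvOuterFilter (g : Int → Int) (l : List (Int × Char)) (t : Int) :
    l.foldl (fun t p => if p.2 = 'A' then t + g p.1 else t) t
    = ((l.filter (fun q => q.2 = 'A')).map (·.1)).foldl (fun t a => t + g a) t := by
  induction l generalizing t with
  | nil => simp
  | cons p rest ih =>
    simp only [List.foldl_cons, List.filter_cons]
    by_cases h : p.2 = 'A' <;> simp [h, ih]

-- the per-'A' summand of A equals the per-'A' summand of B, for in-range a under Pre_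
theorem pvStepEq (N X Y : Int) (cs : List Char)
    (_hNlow : -((cs.length : Int) + 1) ≤ N) (hN : N ≤ (cs.length : Int)) (hX : 0 ≤ X)
    (hXY : X ≤ Y + 1)
    (a : Int) (ha0 : 0 ≤ a) (ha : a < (cs.length : Int)) (t : Int) :
    pvStepTotal N X Y ((0:Int) :: pvPref 'P' 0 cs) ((0:Int) :: pvPref 'B' 0 cs) t a
    = t + ((((PySem.List.pyRange (max 0 (a - Y)) (a - X + 1)).foldl (pvWinStep cs) (0, 0)).1
             * ((PySem.List.pyRange (max 0 (a + X)) (min N (a + Y + 1))).foldl (pvWinStep cs) (0, 0)).2)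
          + (((PySem.List.pyRange (max 0 (a + X)) (min N (a + Y + 1))).foldl (pvWinStep cs) (0, 0)).1
             * ((PySem.List.pyRange (max 0 (a - Y)) (a - X + 1)).foldl (pvWinStep cs) (0, 0)).2)) := by
  by_cases hNneg : N < 0
  · -- N < 0: A's two right prefix lookups coincide (both at index N) so its right counts are 0,
    -- and B's right range is empty; both contributions vanish
    have h1 : min N (a + X) = N := by omega
    have h2 : min N (a + Y + 1) = N := by omega
    rw [PySem.List.pyRange_one_eq_nil (show min N (a + Y + 1) ≤ max 0 (a + X) by omega)]
    simp only [pvStepTotal, h1, h2, List.foldl_nil]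
    ring
  have hN0 : 0 ≤ N := by omega
  have hle1 : max 0 (a - Y) ≤ max 0 (a - X + 1) := by omega
  have hle2 : max 0 (a - X + 1) ≤ (cs.length : Int) := by omega
  have hrs0 : 0 ≤ min N (a + X) := by omega
  have hrs1 : min N (a + X) ≤ min N (a + Y + 1) := by omega
  have hre : min N (a + Y + 1) ≤ (cs.length : Int) := by omega
  -- B's left window fold
  rw [pvWinFold cs ((a - X + 1) - max 0 (a - Y)).toNat (max 0 (a - Y)) (a - X + 1) rfl
        (by omega) (by omega)]
  -- B's right window fold
  rw [pvWinFold cs ((min N (a + Y + 1)) - max 0 (a + X)).toNat (max 0 (a + X))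
        (min N (a + Y + 1)) rfl (by omega) hre]
  -- left windows coincide: (a-X+1).toNat = (max 0 (a-X+1)).toNat
  have hL : (a - X + 1).toNat = (max 0 (a - X + 1)).toNat := by omega
  -- right windows coincide
  have hR : (cs.take (min N (a + Y + 1)).toNat).drop (min N (a + X)).toNat
      = (cs.take (min N (a + Y + 1)).toNat).drop (max 0 (a + X)).toNat := by
    by_cases hc : a + X ≤ N
    · have : (min N (a + X)).toNat = (max 0 (a + X)).toNat := by omega
      rw [this]
    · have hre' : min N (a + Y + 1) = N := by omega
      rw [List.drop_eq_nil_of_le (by simp; omega), List.drop_eq_nil_of_le (by simp; omega)]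
  simp only [pvStepTotal]
  rw [pvPrefDiff 'P' cs (max 0 (a - Y)) (max 0 (a - X + 1)) (by omega) hle1 hle2]
  rw [pvPrefDiff 'B' cs (max 0 (a - Y)) (max 0 (a - X + 1)) (by omega) hle1 hle2]
  rw [pvPrefDiff 'P' cs (min N (a + X)) (min N (a + Y + 1)) hrs0 hrs1 hre]
  rw [pvPrefDiff 'B' cs (min N (a + X)) (min N (a + Y + 1)) hrs0 hrs1 hre]
  rw [hL, hR]
  ring

-- ===== VERDICT (by name: the statement is the Claim_ definition above) =====
theorem getArtisticPhotographCount_spec : Claim_equal_getArtisticPhotographCount := by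
  intro N C X Y hdom hpre
  unfold Spec_getArtisticPhotographCount
  unfold getArtisticPhotographCount getArtisticPhotographCount_alt
  have hlen : (C.length : Int) = (C.toList.length : Int) := by simp
  simp only []
  rw [pvFoldCount C.toList 0 [] [0] [0] 0 0]
  rw [pvOuterFilter (fun a =>
        (((PySem.List.pyRange (max 0 (a - Y)) (a - X + 1)).foldl (pvWinStep C.toList) (0, 0)).1
           * ((PySem.List.pyRange (max 0 (a + X)) (min N (a + Y + 1))).foldl (pvWinStep C.toList) (0, 0)).2)
        + (((PySem.List.pyRange (max 0 (a + X)) (min N (a + Y + 1))).foldl (pvWinStep C.toList) (0, 0)).1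
           * ((PySem.List.pyRange (max 0 (a - Y)) (a - X + 1)).foldl (pvWinStep C.toList) (0, 0)).2))]
  simp only [List.nil_append, List.singleton_append]
  refine PySem.List.foldl_congr_mem _ _ _ 0 ?_
  intro acc x hx
  simp only [List.mem_map, List.mem_filter] at hx
  obtain ⟨q, ⟨hqmem, hqA⟩, hqx⟩ := hx
  rw [PySem.List.mem_enumerate_iff] at hqmem
  obtain ⟨k, hk, hq⟩ := hqmem
  have hx0 : 0 ≤ x := by subst hq hqx; simp
  have hxlen : x < (C.toList.length : Int) := by subst hq hqx; simp; omega
  have hA : 'A' ∈ C.toList := by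
    have := List.getElem_mem hk
    subst hq
    simp only [decide_eq_true_eq] at hqA
    rwa [hqA] at this
  rcases hpre with h | ⟨hNlow, hN, hX, hXY⟩
  · exact absurd hA h
  · exact pvStepEq N X Y C.toList (by omega) (by omega) hX hXY x hx0 hxlen acc
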